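-- pv_equiv track=rewrite | github.com/sua01/Programmers | level1/1.py | solution
-- ===== SOURCE A (Python) =====
-- def solution(id_list, report, k):
--     result = {}
--     dic = {}
--     reported = {}
--
--     # 이용자id가 신고한id 배열 만들기
--     for i in id_list:
--         dic[i] = []
--         result[i] = 0
--         reported[i] = 0
--
--     # 이용자id, 신고한 id 분리하기 & 배열에 넣기
--     for i in report:
--         user, reportedUser = i.split(' ')[0], i.split(' ')[1]
--         dic[user].append(reportedUser)
--
--     # 신고받은 id 횟수 세기
--     for i in list(dic.values()):
--         for j in set(i):    # 리스트 중복 제거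
--             reported[j] += 1
--
--
--     # 신고횟수 2회 이상인 아이디를 신고한 이용자 id 찾기
--     for i in id_list:
--         for j in dic[i]:
--             if reported[j] == 2:
--                 result[i] += 1
--
--
--     answer = []
--     answer = list(result.values())
--     return answer
-- ===== SOURCE B (Python) =====
-- def solution(id_list, report, k):
--     # No per-user grouping, no dedup pass, no incremental tallies: the
--     # distinct-reporter count of target j is just the number of ids i with
--     # (i, j) in the pair set, computed directly per id; one pass over the raw
--     # report then adds the boolean "its target was reported by exactly two".
--     pairs = {(r.split(' ')[0], r.split(' ')[1]) for r in report}
--     hits = {j: sum(1 for i in id_list if (i, j) in pairs) for j in id_list}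
--     out = {u: 0 for u in id_list}
--     for r in report:
--         out[r.split(' ')[0]] += hits[r.split(' ')[1]] == 2
--     return list(out.values())
-- ===== Notes on version B (the rewrite author's own statement) =====
-- stated objective: alternative
-- what changed: Drops A's per-user grouping, dedup pass and incremental tallies: B builds one set of (reporter,target) pairs, computes each target's distinct-reporter count directly as |{i in id_list : (i,j) in pairs}| by membership counting, and one pass over the raw report adds the boolean 'target was reported by exactly two' per reporter.
-- outside the precondition, e.g. on solution(['a', 'a', 'b', 'c'], ['a b', 'c b'], 2): A returns [2, 0, 1], B returns [0, 0, 0]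
import Mathlib
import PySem

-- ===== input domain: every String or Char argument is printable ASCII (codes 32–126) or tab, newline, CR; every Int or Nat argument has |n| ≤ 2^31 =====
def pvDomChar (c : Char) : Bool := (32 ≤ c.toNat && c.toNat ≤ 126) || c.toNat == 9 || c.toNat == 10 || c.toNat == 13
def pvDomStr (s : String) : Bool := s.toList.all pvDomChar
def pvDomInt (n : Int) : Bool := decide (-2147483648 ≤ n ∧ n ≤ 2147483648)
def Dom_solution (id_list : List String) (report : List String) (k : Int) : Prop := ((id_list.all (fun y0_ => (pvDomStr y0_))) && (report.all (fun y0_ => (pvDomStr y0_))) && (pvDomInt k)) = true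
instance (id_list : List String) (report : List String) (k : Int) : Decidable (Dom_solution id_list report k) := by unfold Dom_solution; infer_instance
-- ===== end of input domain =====

-- B drops A's dict tallies and per-user dedup: it builds one set of (reporter,target) pairs,
-- derives the set of twice-reported targets by counting ids whose pair is in that set, and
-- counts each user's raw report entries hitting that set; objective: alternative.

-- shared parsing helpers: r.split(' ')[0] and r.split(' ')[1] (presence guaranteed by Pre_)
def pvTok0 (r : String) : String := (((PySem.Str.split? r " ").getD [])[0]?).getD ""
def pvTok1 (r : String) : String := (((PySem.Str.split? r " ").getD [])[1]?).getD ""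

-- ===== PORT A =====
def solution (id_list : List String) (report : List String) (k : Int) : List Int :=
  -- result = {}; dic = {}; reported = {} and the first for-loop filling all three
  let st := id_list.foldl
    (fun (st : PySem.Dict String Int × PySem.Dict String (List String) × PySem.Dict String Int) i =>
      (st.1.insert i 0, st.2.1.insert i [], st.2.2.insert i 0))
    (PySem.Dict.empty, PySem.Dict.empty, PySem.Dict.empty)
  let result := st.1
  let reported := st.2.2
  -- for i in report: dic[user].append(reportedUser)
  let dic := report.foldl (fun d i => d.modify (pvTok0 i) [] (· ++ [pvTok1 i])) st.2.1
  -- for i in list(dic.values()): for j in set(i): reported[j] += 1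
  let reported := dic.values.foldl
    (fun rep i => (PySem.Set.ofList i).foldl (fun rep j => rep.modify j 0 (· + 1)) rep) reported
  -- for i in id_list: for j in dic[i]: if reported[j] == 2: result[i] += 1
  let result := id_list.foldl
    (fun res i => (dic.getD i []).foldl
      (fun res j => if reported.getD j 0 == 2 then res.modify i 0 (· + 1) else res) res) result
  result.values

-- ===== PORT B =====
def solution_alt (id_list : List String) (report : List String) (k : Int) : List Int :=
  -- pairs = {(r.split(' ')[0], r.split(' ')[1]) for r in report}
  let pairs := PySem.Set.ofList (report.map (fun r => (pvTok0 r, pvTok1 r)))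
  -- hits = {j: sum(1 for i in id_list if (i, j) in pairs) for j in id_list}
  let hits := id_list.foldl (fun d j => d.insert j
    ((id_list.map (fun i => if PySem.Set.contains pairs (i, j) then (1 : Int) else 0)).sum))
    PySem.Dict.empty
  -- out = {u: 0 for u in id_list}; for r in report: out[u] += hits[t] == 2
  -- (out[u] / hits[t] raise KeyError on ids outside id_list; excluded by Pre_, so the
  --  getD/modify defaults below are unreachable on admitted inputs)
  let out := id_list.foldl (fun d u => d.insert u (0 : Int)) PySem.Dict.empty
  let out := report.foldl (fun d r =>
    d.modify (pvTok0 r) 0 (· + (if hits.getD (pvTok1 r) 0 == 2 then 1 else 0))) out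
  out.values

-- ===== PRECONDITION & SPEC =====
-- Pre_ excludes (a) report entries without two space-separated tokens or naming an id outside
-- id_list (KeyError/IndexError in A), and (b) id_list with duplicate ids, a defensible corner
-- where A's dict-keyed result (shorter output, duplicated key double-counted) is accidental.
def Pre_solution (id_list : List String) (report : List String) (k : Int) : Prop :=
  id_list.Nodup ∧
  ∀ r ∈ report, 2 ≤ ((PySem.Str.split? r " ").getD []).length ∧ pvTok0 r ∈ id_list ∧ pvTok1 r ∈ id_list
instance (id_list : List String) (report : List String) (k : Int) : Decidable (Pre_solution id_list report k) := by unfold Pre_solution; infer_instance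

def pvWitness_solution : List String × List String × Int :=
  (["muzi", "frodo", "apeach"], ["muzi frodo", "apeach frodo"], 2)

def Spec_solution (id_list : List String) (report : List String) (k : Int) (out : List Int) : Prop := out = solution_alt id_list report k
instance (id_list : List String) (report : List String) (k : Int) (out : List Int) : Decidable (Spec_solution id_list report k out) := by unfold Spec_solution; infer_instance

-- ===== CLAIM (what is proved, stated in full; the proofs are below) =====
def Claim_equal_solution : Prop := ∀ (id_list : List String) (report : List String) (k : Int), Dom_solution id_list report k → Pre_solution id_list report k → Spec_solution id_list report k (solution id_list report k)

-- ===== LEMMAS AND PROOFS =====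

-- L1: the triple initialisation loop is three independent insert loops
lemma pv_foldl_triple (l : List String) (a : PySem.Dict String Int)
    (b : PySem.Dict String (List String)) (c : PySem.Dict String Int) :
    l.foldl (fun st i => (st.1.insert i 0, st.2.1.insert i [], st.2.2.insert i 0)) (a, b, c)
      = (l.foldl (fun d i => d.insert i 0) a,
         l.foldl (fun d i => d.insert i []) b,
         l.foldl (fun d i => d.insert i 0) c) := by
  induction l generalizing a b c with
  | nil => rfl
  | cons x t ih => simpa using ih ..

lemma pv_getD_initI (l : List String) (d : PySem.Dict String Int) (j : String)
    (h : d.getD j 0 = 0) : (l.foldl (fun d i => d.insert i (0 : Int)) d).getD j 0 = 0 := by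
  induction l generalizing d with
  | nil => exact h
  | cons x t ih =>
      refine ih _ ?_
      rw [PySem.Dict.getD_insert]
      split <;> simp [h]

lemma pv_getD_initL (l : List String) (d : PySem.Dict String (List String)) (j : String)
    (h : d.getD j [] = []) : (l.foldl (fun d i => d.insert i ([] : List String)) d).getD j [] = [] := by
  induction l generalizing d with
  | nil => exact h
  | cons x t ih =>
      refine ih _ ?_
      rw [PySem.Dict.getD_insert]
      split <;> simp [h]

lemma pv_keys_initI (l : List String) (hl : l.Nodup) :
    (l.foldl (fun d i => d.insert i (0 : Int)) PySem.Dict.empty).keys = l := by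
  rw [PySem.Dict.keys_foldl_insert l (fun _ _ => (0 : Int)), PySem.Dict.keys_empty,
    PySem.Set.update_nil_left, PySem.Set.ofList_eq_self_of_nodup _ hl]

lemma pv_keys_initL (l : List String) (hl : l.Nodup) :
    (l.foldl (fun d i => d.insert i ([] : List String)) PySem.Dict.empty).keys = l := by
  rw [PySem.Dict.keys_foldl_insert l (fun _ _ => ([] : List String)), PySem.Dict.keys_empty,
    PySem.Set.update_nil_left, PySem.Set.ofList_eq_self_of_nodup _ hl]

-- keys of dic after the append loop (all reporters already keys)
lemma pv_keys_dic (report : List String) (d : PySem.Dict String (List String))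
    (h : ∀ r ∈ report, pvTok0 r ∈ d.keys) :
    (report.foldl (fun d i => d.modify (pvTok0 i) [] (fun x => x ++ [pvTok1 i])) d).keys = d.keys := by
  rw [PySem.Dict.keys_foldl_modify_key report pvTok0 [] (fun _ i => (fun x => x ++ [pvTok1 i])),
    PySem.Set.update_eq_append_filter]
  have : List.filter (fun y => !PySem.Set.contains d.keys y) (PySem.Set.ofList (report.map pvTok0)) = [] := by
    rw [List.filter_eq_nil_iff]
    intro y hy
    rw [PySem.Set.mem_ofList] at hy
    obtain ⟨r, hr, rfl⟩ := List.mem_map.mp hy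
    simpa using h r hr
  rw [this, List.append_nil]

-- the nested reported-count loop of A, as a sum
lemma pv_repA_getD (L : List (List String)) (rep : PySem.Dict String Int) (j : String) :
    (L.foldl (fun rep i => (PySem.Set.ofList i).foldl (fun rep j => rep.modify j 0 (· + 1)) rep) rep).getD j 0
      = rep.getD j 0 + (L.map (fun i => ((PySem.Set.ofList i).count j : Int))).sum := by
  induction L generalizing rep with
  | nil => simp
  | cons x t ih =>
      rw [List.foldl_cons, ih, PySem.Dict.getD_foldl_modify_add_one]
      simp [List.count]
      ring

-- inner result loop of A: only key i moves, by the number of hits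
lemma pv_resA_inner (p : String → Bool) (lst : List String) (res : PySem.Dict String Int)
    (i x : String) :
    (lst.foldl (fun res j => if p j then res.modify i 0 (· + 1) else res) res).getD x 0
      = res.getD x 0 + if x = i then (lst.countP p : Int) else 0 := by
  induction lst generalizing res with
  | nil => simp
  | cons a t ih =>
      rw [List.foldl_cons, ih, List.countP_cons]
      by_cases hp : p a
      · rw [if_pos hp, PySem.Dict.getD_modify]
        by_cases hx : x = i
        · subst hx; simp [hp]; ring
        · simp [hx]
      · simp [hp]

lemma pv_resA_inner_keys (p : String → Bool) (lst : List String) (res : PySem.Dict String Int)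
    (i : String) (hi : i ∈ res.keys) :
    (lst.foldl (fun res j => if p j then res.modify i 0 (· + 1) else res) res).keys = res.keys := by
  induction lst generalizing res with
  | nil => rfl
  | cons a t ih =>
      rw [List.foldl_cons]
      by_cases hp : p a
      · rw [if_pos hp]
        have hk : (res.modify i 0 (· + 1)).keys = res.keys := by
          rw [PySem.Dict.keys_modify,
            PySem.Dict.keys_insert_of_contains _ _ ((PySem.Dict.contains_iff_mem_keys _ _).mpr hi)]
        rw [ih _ (by rw [hk]; exact hi), hk]
      · rw [if_neg hp]; exact ih _ hi

-- outer result loop of A over nodup ids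
lemma pv_resA_outer (p : String → Bool) (g : String → List String) :
    ∀ (l : List String), l.Nodup → ∀ (res : PySem.Dict String Int) (u : String),
    (l.foldl (fun res i => (g i).foldl
        (fun res j => if p j then res.modify i 0 (· + 1) else res) res) res).getD u 0
      = res.getD u 0 + if u ∈ l then ((g u).countP p : Int) else 0 := by
  intro l
  induction l with
  | nil => simp
  | cons a t ih =>
      intro hnd res u
      rw [List.foldl_cons, ih hnd.of_cons, pv_resA_inner]
      by_cases hu : u = a
      · subst hu
        have : u ∉ t := (List.nodup_cons.mp hnd).1
        simp [this]
      · simp [hu, List.mem_cons]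

lemma pv_resA_outer_keys (p : String → Bool) (g : String → List String) :
    ∀ (l : List String) (res : PySem.Dict String Int), (∀ i ∈ l, i ∈ res.keys) →
    (l.foldl (fun res i => (g i).foldl
        (fun res j => if p j then res.modify i 0 (· + 1) else res) res) res).keys = res.keys := by
  intro l
  induction l with
  | nil => intro res _; rfl
  | cons a t ih =>
      intro res h
      rw [List.foldl_cons]
      have hk := pv_resA_inner_keys p (g a) res a (h a (List.mem_cons_self ..))
      rw [ih _ (fun i hi => by rw [hk]; exact h i (List.mem_cons_of_mem _ hi)), hk]

-- hits dict of B: a nodup-keyed map comprehension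
lemma pv_getD_foldl_insert_not_mem (f : String → Int) (l : List String)
    (d : PySem.Dict String Int) (j : String) (hj : j ∉ l) :
    (l.foldl (fun d x => d.insert x (f x)) d).getD j 0 = d.getD j 0 := by
  induction l generalizing d with
  | nil => rfl
  | cons x t ih =>
      rw [List.foldl_cons, ih _ (fun h => hj (List.mem_cons_of_mem _ h)),
        PySem.Dict.getD_insert]
      refine if_neg (fun h => hj ?_)
      rw [h]
      exact List.mem_cons_self ..

lemma pv_getD_insert_map (f : String → Int) (l : List String) (hl : l.Nodup)
    (d : PySem.Dict String Int) (j : String) (hj : j ∈ l) :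
    (l.foldl (fun d x => d.insert x (f x)) d).getD j 0 = f j := by
  induction l generalizing d with
  | nil => cases hj
  | cons x t ih =>
      rw [List.foldl_cons]
      rcases List.mem_cons.mp hj with rfl | hjt
      · rw [pv_getD_foldl_insert_not_mem f t _ j (List.nodup_cons.mp hl).1,
          PySem.Dict.getD_insert]
        simp
      · exact ih (List.nodup_cons.mp hl).2 _ hjt

-- out loop of B over the raw report (out[u] += bool)
lemma pv_out_getD (q : String → Bool) (k0 : String → String) (l : List String)
    (d : PySem.Dict String Int) (u : String) :
    (l.foldl (fun d r => d.modify (k0 r) 0 (fun x => x + (if q r then 1 else 0))) d).getD u 0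
      = d.getD u 0 + (l.countP (fun r => q r && (k0 r == u)) : Int) := by
  induction l generalizing d with
  | nil => simp
  | cons a t ih =>
      rw [List.foldl_cons, ih, List.countP_cons, PySem.Dict.getD_modify]
      by_cases hu : u = k0 a
      · by_cases hq : q a
        · simp [hu, hq]; ring
        · simp [hu, hq]
      · simp [hu, Ne.symm hu]

lemma pv_out_keys (q : String → Bool) (k0 : String → String) (l : List String)
    (d : PySem.Dict String Int) (h : ∀ r ∈ l, k0 r ∈ d.keys) :
    (l.foldl (fun d r => d.modify (k0 r) 0 (fun x => x + (if q r then 1 else 0))) d).keys = d.keys := by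
  induction l generalizing d with
  | nil => rfl
  | cons a t ih =>
      rw [List.foldl_cons]
      have hk : (d.modify (k0 a) 0 (fun x => x + (if q a then 1 else 0))).keys = d.keys := by
        rw [PySem.Dict.keys_modify, PySem.Dict.keys_insert_of_contains _ _
          ((PySem.Dict.contains_iff_mem_keys _ _).mpr (h a (List.mem_cons_self ..)))]
      rw [ih _ (fun r hr => by rw [hk]; exact h r (List.mem_cons_of_mem _ hr)), hk]

lemma pv_mem_targets (P : List (String × String)) (i j : String) :
    (j ∈ (P.filter (fun p => p.1 == i)).map (fun p => p.2)) ↔ (i, j) ∈ P := by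
  simp only [List.mem_map, List.mem_filter, beq_iff_eq]
  constructor
  · rintro ⟨⟨p1, p2⟩, ⟨hp, h1⟩, h2⟩
    simp only at h1 h2
    subst h1; subst h2; exact hp
  · intro h
    exact ⟨(i, j), ⟨h, rfl⟩, rfl⟩

lemma pv_solution_eq (id_list report : List String) (k : Int) (hnd : id_list.Nodup)
    (hrep : ∀ r ∈ report, 2 ≤ ((PySem.Str.split? r " ").getD []).length ∧ pvTok0 r ∈ id_list ∧ pvTok1 r ∈ id_list) :
    solution id_list report k = solution_alt id_list report k := by
  simp only [solution, solution_alt, pv_foldl_triple]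
  set P := report.map (fun r => (pvTok0 r, pvTok1 r)) with hP
  set initI := id_list.foldl (fun d i => d.insert i (0 : Int)) PySem.Dict.empty with hInitI
  set initL := id_list.foldl (fun d i => d.insert i ([] : List String)) PySem.Dict.empty with hInitL
  set dic := report.foldl (fun d i => d.modify (pvTok0 i) [] (fun x => x ++ [pvTok1 i])) initL with hdic
  set repA := dic.values.foldl (fun rep i => (PySem.Set.ofList i).foldl (fun rep j => rep.modify j 0 (fun x => x + 1)) rep) initI with hrepA
  have hkeysI : initI.keys = id_list := pv_keys_initI id_list hnd
  have hkeysL : initL.keys = id_list := pv_keys_initL id_list hnd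
  have hgetI : ∀ j, initI.getD j 0 = 0 :=
    fun j => pv_getD_initI id_list _ j (PySem.Dict.getD_empty _ _)
  have hkeysdic : dic.keys = id_list := by
    rw [hdic, pv_keys_dic report initL (fun r hr => by rw [hkeysL]; exact (hrep r hr).2.1), hkeysL]
  have hdicfold : dic = P.foldl (fun d p => d.modify p.1 [] (fun x => x ++ [p.2])) initL := by
    rw [hdic, hP, List.foldl_map]
  have hgetdic : ∀ i, dic.getD i [] = (P.filter (fun p => p.1 == i)).map (fun p => p.2) := by
    intro i
    rw [hdicfold, PySem.Dict.getD_foldl_modify_append,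
      pv_getD_initL id_list _ i (PySem.Dict.getD_empty _ _), List.nil_append]
  have hvaluesdic : dic.values = id_list.map (fun i => dic.getD i []) := by
    rw [PySem.Dict.values_eq_map_keys dic (by rw [hkeysdic]; exact hnd) [], hkeysdic]
  have hrepAval : ∀ j, repA.getD j 0 = (id_list.countP (fun i => decide ((i, j) ∈ P)) : Int) := by
    intro j
    rw [hrepA, pv_repA_getD, hgetI, hvaluesdic, List.map_map, zero_add]
    have hcongr : ∀ i ∈ id_list,
        ((fun i => ((PySem.Set.ofList i).count j : Int)) ∘ (fun i => dic.getD i [])) i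
          = (fun i => if (fun i => decide ((i, j) ∈ P)) i = true then (1 : Int) else 0) i := by
      intro i _
      simp only [Function.comp]
      rw [(PySem.Set.nodup_ofList _).count]
      have hmem : (j ∈ PySem.Set.ofList (dic.getD i [])) ↔ (i, j) ∈ P := by
        rw [PySem.Set.mem_ofList, hgetdic i]; exact pv_mem_targets P i j
      by_cases hij : (i, j) ∈ P
      · rw [if_pos (hmem.mpr hij)]; simp [hij]
      · rw [if_neg (fun hc => hij (hmem.mp hc))]; simp [hij]
    rw [List.map_congr_left hcongr, PySem.List.sum_map_ite_one_zero]
  -- B's pair set and hits map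
  have hpairmem : ∀ q : String × String,
      PySem.Set.contains (PySem.Set.ofList P) q = decide (q ∈ P) := by
    intro q
    by_cases hq : q ∈ P
    · rw [(PySem.Set.contains_iff _ _).mpr ((PySem.Set.mem_ofList _ _).mpr hq)]; simp [hq]
    · have hnot : ¬ q ∈ PySem.Set.ofList P := fun hc => hq ((PySem.Set.mem_ofList _ _).mp hc)
      simp only [hq, decide_false]
      exact Bool.eq_false_iff.mpr (fun hc => hnot ((PySem.Set.contains_iff _ _).mp hc))
  have hsum : ∀ j, (id_list.map (fun i =>
      if PySem.Set.contains (PySem.Set.ofList P) (i, j) then (1 : Int) else 0)).sum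
      = (id_list.countP (fun i => decide ((i, j) ∈ P)) : Int) := by
    intro j
    have hc : ∀ i ∈ id_list,
        (fun i => if PySem.Set.contains (PySem.Set.ofList P) (i, j) then (1 : Int) else 0) i
          = (fun i => if decide ((i, j) ∈ P) = true then (1 : Int) else 0) i := by
      intro i _
      simp only [hpairmem (i, j)]
    rw [List.map_congr_left hc]
    exact PySem.List.sum_map_ite_one_zero (fun i => decide ((i, j) ∈ P)) id_list
  set hits := id_list.foldl (fun d j => d.insert j
    ((id_list.map (fun i => if PySem.Set.contains (PySem.Set.ofList P) (i, j) then (1 : Int) else 0)).sum))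
    PySem.Dict.empty with hhitsdef
  have hhits : ∀ j ∈ id_list, hits.getD j 0
      = (id_list.countP (fun i => decide ((i, j) ∈ P)) : Int) := by
    intro j hj
    rw [hhitsdef, pv_getD_insert_map _ id_list hnd _ j hj, hsum j]
  set resA := id_list.foldl (fun res i => (dic.getD i []).foldl
    (fun res j => if repA.getD j 0 == 2 then res.modify i 0 (fun x => x + 1) else res) res) initI with hresA
  set resB := report.foldl (fun d r =>
    d.modify (pvTok0 r) 0 (fun x => x + (if hits.getD (pvTok1 r) 0 == 2 then 1 else 0))) initI with hresB
  show resA.values = resB.values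
  have hkA : resA.keys = initI.keys :=
    pv_resA_outer_keys (fun j => repA.getD j 0 == 2) (fun i => dic.getD i []) id_list initI
      (fun i hi => by rw [hkeysI]; exact hi)
  have hkB : resB.keys = initI.keys :=
    pv_out_keys (fun r => hits.getD (pvTok1 r) 0 == 2) pvTok0 report initI
      (fun r hr => by rw [hkeysI]; exact (hrep r hr).2.1)
  rw [PySem.Dict.values_eq_map_keys resA (by rw [hkA, hkeysI]; exact hnd) 0,
    PySem.Dict.values_eq_map_keys resB (by rw [hkB, hkeysI]; exact hnd) 0, hkA, hkB, hkeysI]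
  apply List.map_congr_left
  intro u hu
  have hvA : resA.getD u 0 = initI.getD u 0 + if u ∈ id_list
      then ((dic.getD u []).countP (fun j => repA.getD j 0 == 2) : Int) else 0 :=
    pv_resA_outer (fun j => repA.getD j 0 == 2) (fun i => dic.getD i []) id_list hnd initI u
  have hvB : resB.getD u 0 = initI.getD u 0
      + (report.countP (fun r => (hits.getD (pvTok1 r) 0 == 2) && (pvTok0 r == u)) : Int) :=
    pv_out_getD (fun r => hits.getD (pvTok1 r) 0 == 2) pvTok0 report initI u
  rw [hvA, hvB, if_pos hu, hgetI, zero_add, zero_add]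
  have hcA : (dic.getD u []).countP (fun j => repA.getD j 0 == 2)
      = P.countP (fun p => (repA.getD p.2 0 == 2) && (p.1 == u)) := by
    rw [hgetdic u, List.countP_map, List.countP_filter]; rfl
  have hcB : report.countP (fun r => (hits.getD (pvTok1 r) 0 == 2) && (pvTok0 r == u))
      = P.countP (fun p => (hits.getD p.2 0 == 2) && (p.1 == u)) := by
    rw [hP, List.countP_map]; rfl
  rw [hcA, hcB]
  congr 1
  apply List.countP_congr
  intro p hp
  have hp2 : p.2 ∈ id_list := by
    rw [hP] at hp
    obtain ⟨r, hr, rfl⟩ := List.mem_map.mp hp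
    exact (hrep r hr).2.2
  rw [hrepAval p.2, hhits p.2 hp2]

-- ===== VERDICT (by name: the statement is the Claim_ definition above) =====
theorem solution_spec : Claim_equal_solution := by
  intro id_list report k _hdom hpre
  exact pv_solution_eq id_list report k hpre.1 hpre.2
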